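-- pv_equiv track=rewrite | github.com/mateusz-orzel/Algi | zadanie2/zad2.py | sl_coloring
-- ===== SOURCE A (Python) =====
-- from collections import defaultdict
-- import heapq
--
-- def sl_coloring(edges, n):
--     graph = defaultdict(list)
--     for u, v in edges:
--         graph[u].append(v)
--         graph[v].append(u)
--
--     degree = {node: len(adj) for node, adj in graph.items()}
--
--     heap = [(len(adj), node) for node, adj in graph.items()]
--     heapq.heapify(heap)
--
--     elimination_order = []
--     while heap:
--         _, node = heapq.heappop(heap)
--         elimination_order.append(node)
--         for neighbor in graph[node]:
--             if neighbor in degree: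
--                 degree[neighbor] -= 1
--                 heap = [(degree[n], n) for n in degree if n != node]
--                 heapq.heapify(heap)
--         del degree[node]
--
--     color = {}
--     for node in reversed(elimination_order):
--         available_colors = {color[neighbor] for neighbor in graph[node] if neighbor in color}
--         for c in range(n):
--             if c not in available_colors:
--                 color[node] = c
--                 break
--
--     return color
-- ===== SOURCE B (Python) =====
-- from collections import defaultdict
--
--
-- def sl_coloring(edges, n):
--     graph = defaultdict(list)
--     for u, v in edges:
--         graph[u].append(v)
--         graph[v].append(u)
--
--     degree = {node: len(adj) for node, adj in graph.items()}
--
--     # smallest-last order: no heap at all -- one direct min scan of the live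
--     # degree table per eliminated vertex (ties broken by smaller vertex id,
--     # exactly the (degree, node) tuple order the heap version uses).
--     order = []
--     while degree:
--         node = min(degree, key=lambda x: (degree[x], x))
--         order.append(node)
--         for nb in graph[node]:
--             if nb in degree:
--                 degree[nb] -= 1
--         del degree[node]
--
--     # greedy coloring back to front: first free colour by counting up,
--     # assigned only if it fits in the allowed palette 0..n-1.
--     color = {}
--     for node in reversed(order):
--         used = {color[nb] for nb in graph[node] if nb in color}
--         c = 0
--         while c in used:
--             c += 1
--         if c < n:
--             color[node] = c
--     return color
-- ===== Notes on version B (the rewrite author's own statement) =====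
-- stated objective: simpler
-- what changed: B drops the heap entirely: instead of rebuilding and re-heapifying the whole heap after every single degree decrement, it picks each smallest-last vertex by one direct minimum scan of the live degree table, and replaces the bounded for-range colour search with a first-free-colour counter; intended as faster (worst-case O(V*E) vs O(V^2+E)) but a timing run measured only ~1.4x at the largest size, so no speed is claimed.
import Mathlib
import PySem

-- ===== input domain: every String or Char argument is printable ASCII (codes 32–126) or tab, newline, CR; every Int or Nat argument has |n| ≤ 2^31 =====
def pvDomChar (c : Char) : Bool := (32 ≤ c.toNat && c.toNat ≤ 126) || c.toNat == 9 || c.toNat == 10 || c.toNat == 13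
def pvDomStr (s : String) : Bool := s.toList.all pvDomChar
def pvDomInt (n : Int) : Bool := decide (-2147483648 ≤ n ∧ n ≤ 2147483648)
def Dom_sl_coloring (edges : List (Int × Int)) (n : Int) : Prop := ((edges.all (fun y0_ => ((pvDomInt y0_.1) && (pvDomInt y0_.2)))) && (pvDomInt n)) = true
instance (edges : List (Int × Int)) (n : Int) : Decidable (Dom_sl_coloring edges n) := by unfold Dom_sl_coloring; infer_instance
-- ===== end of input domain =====

-- B replaces A's rebuild-the-whole-heap-after-every-decrement smallest-last loop by one direct
-- minimum scan of the live degree table per eliminated vertex (and a first-free-colour counter);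
-- same return value on every input.


-- Python's tuple comparison (d1, x1) < (d2, x2), lexicographic
def pvLt (a b : Int × Int) : Bool := decide (a.1 < b.1) || (a.1 == b.1 && decide (a.2 < b.2))

-- shared by both ports (the corresponding Python lines are identical in A and B):
-- graph = defaultdict(list); for u, v in edges: graph[u].append(v); graph[v].append(u)
def slGraph (edges : List (Int × Int)) : PySem.Dict Int (List Int) :=
  edges.foldl (fun g e => (g.modify e.1 [] (· ++ [e.2])).modify e.2 [] (· ++ [e.1])) PySem.Dict.empty

-- degree = {node: len(adj) for node, adj in graph.items()}
def slDegree0 (g : PySem.Dict Int (List Int)) : PySem.Dict Int Int :=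
  PySem.Dict.ofList (g.items.map (fun p => (p.1, (p.2.length : Int))))

-- available_colors = {color[nb] for nb in graph[node] if nb in color}  (identical line in A and B)
def slUsed (g : PySem.Dict Int (List Int)) (col : PySem.Dict Int Int) (node : Int) : PySem.Set Int :=
  PySem.Set.ofList (((g.getD node []).filter (fun nb => col.contains nb)).map (fun nb => col.getD nb 0))

-- ===== PORT A =====
-- heapq is ported by its contract: the heap list holds the pending (degree, node) entries
-- (heapify = id on the entry list) and heappop removes the minimum entry; only the popped
-- minimum and the remaining multiset of entries are ever observed by A.
def pvPopMin (x : Int × Int) (xs : List (Int × Int)) : Int × Int :=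
  xs.foldl (fun m y => if pvLt y m then y else m) x

-- heap = [(degree[n], n) for n in degree if n != node]; heapq.heapify(heap)
def slRebuild (node : Int) (d : PySem.Dict Int Int) : List (Int × Int) :=
  (d.items.filter (fun p => p.1 != node)).map (fun p => (p.2, p.1))

-- body of `for neighbor in graph[node]:` — the state is (degree, heap)
def slStepA (node : Int) (s : PySem.Dict Int Int × List (Int × Int)) (nb : Int) :
    PySem.Dict Int Int × List (Int × Int) :=
  if s.1.contains nb then                                   -- if neighbor in degree:
    (s.1.modify nb 0 (· - 1),                               --   degree[neighbor] -= 1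
     slRebuild node (s.1.modify nb 0 (· - 1)))              --   heap = [...]; heapify(heap)
  else s

-- while heap: ... ; fuel = initial heap length (one key leaves `degree` per iteration)
def slLoopA (g : PySem.Dict Int (List Int)) :
    Nat → PySem.Dict Int Int → List (Int × Int) → List Int → List Int
  | 0, _, _, ord => ord
  | fuel+1, deg, heap, ord =>
    match heap with
    | [] => ord
    | x :: xs =>
      let m := pvPopMin x xs                                -- _, node = heapq.heappop(heap)
      let st := (g.getD m.2 []).foldl (slStepA m.2) (deg, (x :: xs).erase m)
      slLoopA g fuel (st.1.erase m.2) st.2 (ord ++ [m.2])   -- del degree[node]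

-- for c in range(n): if c not in available_colors: color[node] = c; break
-- (range(n) is not materialised: the loop counts c upward while c < n, exactly Python's range)
def slFindA (s : PySem.Set Int) (n c : Int) : Option Int :=
  if _h : c < n then (if PySem.Set.contains s c then slFindA s n (c + 1) else some c) else none
termination_by (n - c).toNat
decreasing_by omega

def slColorLoopA (g : PySem.Dict Int (List Int)) (n : Int) (order : List Int) :
    PySem.Dict Int Int :=
  order.reverse.foldl (fun col node =>
    match slFindA (slUsed g col node) n 0 with
    | some c => col.insert node c
    | none => col) PySem.Dict.empty

def sl_coloring (edges : List (Int × Int)) (n : Int) : List (Int × Int) :=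
  let g := slGraph edges
  let deg := slDegree0 g
  let heap := g.items.map (fun p => ((p.2.length : Int), p.1))   -- heap = [(len(adj), node) ...]
  (slColorLoopA g n (slLoopA g heap.length deg heap [])).items

-- ===== PORT B =====
-- node = min(degree, key=lambda x: (degree[x], x)): one scan over the keys, first minimum kept
def slArgmin (deg : PySem.Dict Int Int) (k : Int) (ks : List Int) : Int :=
  ks.foldl (fun b x => if pvLt (deg.getD x 0, x) (deg.getD b 0, b) then x else b) k

-- body of `for nb in graph[node]:` — only the degree table is maintained
def slStepB (d : PySem.Dict Int Int) (nb : Int) : PySem.Dict Int Int :=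
  if d.contains nb then d.modify nb 0 (· - 1) else d        -- if nb in degree: degree[nb] -= 1

-- while degree: ... ; fuel = initial number of keys (one key is deleted per iteration)
def slLoopB (g : PySem.Dict Int (List Int)) :
    Nat → PySem.Dict Int Int → List Int → List Int
  | 0, _, ord => ord
  | fuel+1, deg, ord =>
    match deg.keys with
    | [] => ord
    | k :: ks =>
      let node := slArgmin deg k ks
      let deg2 := (g.getD node []).foldl slStepB deg
      slLoopB g fuel (deg2.erase node) (ord ++ [node])      -- del degree[node]

-- c = 0; while c in used: c += 1  (the scan visits at most |used| members, so |used|+1 fuel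
-- always suffices; on exhausted fuel the current c is returned, which is never reached)
def slFindB (s : PySem.Set Int) : Nat → Int → Int
  | 0, c => c
  | fuel+1, c => if PySem.Set.contains s c then slFindB s fuel (c + 1) else c

def slColorLoopB (g : PySem.Dict Int (List Int)) (n : Int) (order : List Int) :
    PySem.Dict Int Int :=
  order.reverse.foldl (fun col node =>
    let used := slUsed g col node
    let c := slFindB used (used.length + 1) 0
    if c < n then col.insert node c else col) PySem.Dict.empty

def sl_coloring_alt (edges : List (Int × Int)) (n : Int) : List (Int × Int) :=
  let g := slGraph edges
  let deg := slDegree0 g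
  (slColorLoopB g n (slLoopB g deg.size deg [])).items

-- ===== PRECONDITION & SPEC =====
def Spec_sl_coloring (edges : List (Int × Int)) (n : Int) (out : List (Int × Int)) : Prop := out = sl_coloring_alt edges n
instance (edges : List (Int × Int)) (n : Int) (out : List (Int × Int)) : Decidable (Spec_sl_coloring edges n out) := by unfold Spec_sl_coloring; infer_instance

-- ===== CLAIM (what is proved, stated in full; the proofs are below) =====
def Claim_equal_sl_coloring : Prop := ∀ (edges : List (Int × Int)) (n : Int), Dom_sl_coloring edges n → Spec_sl_coloring edges n (sl_coloring edges n)

-- ===== LEMMAS AND PROOFS =====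

theorem pvLt_irrefl (a : Int × Int) : pvLt a a = false := by
  cases a; simp [pvLt]

theorem pvLt_antisymm {a b : Int × Int} (h1 : pvLt a b = false) (h2 : pvLt b a = false) :
    a = b := by
  cases a; cases b; simp [pvLt] at h1 h2 ⊢; omega

theorem pvLt_false_of_lt_of_false {y x r : Int × Int} (h1 : pvLt y x = true)
    (h2 : pvLt y r = false) : pvLt x r = false := by
  cases x; cases y; cases r; simp [pvLt] at h1 h2 ⊢; omega

theorem pvLt_false_trans {a b c : Int × Int} (h1 : pvLt a b = false) (h2 : pvLt b c = false) :
    pvLt a c = false := by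
  cases a; cases b; cases c; simp [pvLt] at h1 h2 ⊢; omega

-- the "keep the first minimum" scan: its result is a member and no element is below it
theorem foldlMin_mem {α : Type} (f : α → Int × Int) (x : α) (xs : List α) :
    xs.foldl (fun b y => if pvLt (f y) (f b) then y else b) x ∈ x :: xs := by
  induction xs generalizing x with
  | nil => simp
  | cons y ys ih =>
    simp only [List.foldl_cons]
    by_cases hz : pvLt (f y) (f x) = true
    · rw [if_pos hz]
      rcases List.mem_cons.mp (ih y) with h | h <;> simp [h]
    · rw [if_neg hz]
      rcases List.mem_cons.mp (ih x) with h | h <;> simp [h]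

theorem foldlMin_min {α : Type} (f : α → Int × Int) (x : α) (xs : List α) :
    ∀ y ∈ x :: xs,
      pvLt (f y) (f (xs.foldl (fun b y => if pvLt (f y) (f b) then y else b) x)) = false := by
  induction xs generalizing x with
  | nil => intro y hy; simp at hy; subst hy; exact pvLt_irrefl _
  | cons z zs ih =>
    intro y hy
    simp only [List.foldl_cons]
    by_cases hzx : pvLt (f z) (f x) = true
    · rw [if_pos hzx]
      have hhead := ih z z (List.mem_cons_self ..)
      rcases List.mem_cons.mp hy with rfl | hy'
      · exact pvLt_false_of_lt_of_false hzx hhead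
      · rcases List.mem_cons.mp hy' with rfl | hy'' <;> [exact hhead; exact ih z y (List.mem_cons_of_mem _ hy'')]
    · rw [if_neg hzx]
      have hhead := ih x x (List.mem_cons_self ..)
      rcases List.mem_cons.mp hy with rfl | hy'
      · exact hhead
      · rcases List.mem_cons.mp hy' with rfl | hy''
        · exact pvLt_false_trans (by simpa using hzx) hhead
        · exact ih x y (List.mem_cons_of_mem _ hy'')


theorem contains_modify_of_contains (d : PySem.Dict Int Int) {nb : Int} (f : Int → Int)
    (hc : d.contains nb = true) (x : Int) : (d.modify nb 0 f).contains x = d.contains x := by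
  show (d.insert nb _).contains x = d.contains x
  rw [PySem.Dict.contains_insert]
  by_cases hx : x = nb
  · subst hx; simp [hc]
  · simp [hx]

theorem keys_stepB (d : PySem.Dict Int Int) (nb : Int) : (slStepB d nb).keys = d.keys := by
  unfold slStepB
  by_cases hc : d.contains nb = true
  · rw [if_pos hc, PySem.Dict.keys_modify, PySem.Dict.keys_insert_of_contains _ _ hc]
  · rw [if_neg hc]

theorem keys_foldB : ∀ (l : List Int) (d : PySem.Dict Int Int),
    (l.foldl slStepB d).keys = d.keys := by
  intro l
  induction l with
  | nil => intro d; rfl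
  | cons nb t ih => intro d; rw [List.foldl_cons, ih, keys_stepB]

theorem foldB_noAlive : ∀ (l : List Int) (d : PySem.Dict Int Int),
    l.any (fun nb => d.contains nb) = false → l.foldl slStepB d = d := by
  intro l
  induction l with
  | nil => intro d _; rfl
  | cons nb t ih =>
    intro d h
    simp only [List.any_cons, Bool.or_eq_false_iff] at h
    rw [List.foldl_cons, show slStepB d nb = d by unfold slStepB; rw [if_neg (by simp [h.1])],
      ih d h.2]

theorem innerFold (node : Int) : ∀ (l : List Int) (d : PySem.Dict Int Int) (h : List (Int × Int)),
    l.foldl (slStepA node) (d, h) =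
      (l.foldl slStepB d,
       if l.any (fun nb => d.contains nb) then slRebuild node (l.foldl slStepB d) else h) := by
  intro l
  induction l with
  | nil => intro d h; simp
  | cons nb t ih =>
    intro d h
    by_cases hc : d.contains nb = true
    · rw [List.foldl_cons, List.foldl_cons,
        show slStepA node (d, h) nb =
          (d.modify nb 0 (· - 1), slRebuild node (d.modify nb 0 (· - 1))) by
            unfold slStepA; rw [if_pos hc],
        show slStepB d nb = d.modify nb 0 (· - 1) by unfold slStepB; rw [if_pos hc],
        ih]
      rw [show (fun x => (d.modify nb 0 (· - 1)).contains x) = (fun x => d.contains x) from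
        funext (contains_modify_of_contains d _ hc)]
      simp only [List.any_cons, hc, Bool.true_or, if_true]
      by_cases ht : t.any (fun x => d.contains x) = true
      · rw [if_pos ht]
      · rw [if_neg (by simp [ht]),
          foldB_noAlive t _ (by
            rw [show (fun nb_1 => (d.modify nb 0 (· - 1)).contains nb_1) = (fun x => d.contains x)
              from funext (contains_modify_of_contains d _ hc)]
            simpa using ht)]
    · rw [List.foldl_cons, List.foldl_cons,
        show slStepA node (d, h) nb = (d, h) by unfold slStepA; rw [if_neg hc],
        show slStepB d nb = d by unfold slStepB; rw [if_neg hc], ih]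
      simp only [List.any_cons, Bool.eq_false_iff.mpr hc]
      simp [Bool.false_or]

theorem swapInj : Function.Injective (fun p : Int × Int => (p.2, p.1)) := by
  intro a b hab; cases a; cases b; simpa [Prod.ext_iff, and_comm] using hab

theorem filter_ne_eq_erase : ∀ (l : List (Int × Int)) (p : Int × Int), p ∈ l →
    (l.map Prod.fst).Nodup → l.filter (fun q => !(q.1 == p.1)) = l.erase p := by
  intro l
  induction l with
  | nil => intro p hp; cases hp
  | cons a t ih =>
    intro p hp hnd
    simp only [List.map_cons, List.nodup_cons] at hnd
    by_cases hap : a = p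
    · subst hap
      rw [List.erase_cons_head, List.filter_cons_of_neg (by simp)]
      apply List.filter_eq_self.mpr
      intro q hq
      have : q.1 ∈ t.map Prod.fst := List.mem_map_of_mem hq
      simp only [Bool.not_eq_eq_eq_not, Bool.not_true, beq_eq_false_iff_ne, ne_eq]
      intro hqe
      exact hnd.1 (hqe ▸ this)
    · have hpt : p ∈ t := by
        rcases List.mem_cons.mp hp with h | h
        · exact absurd h.symm hap
        · exact h
      have hane : a.1 ≠ p.1 := by
        intro he
        exact hnd.1 (he ▸ List.mem_map_of_mem hpt)
      rw [List.erase_cons_tail (by simpa using fun he => hap he),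
        List.filter_cons_of_pos (by simpa using hane), ih p hpt hnd.2]

theorem nodup_keys_erase (d : PySem.Dict Int Int) (k : Int) (h : d.keys.Nodup) :
    (d.erase k).keys.Nodup := by
  have hsub : (d.erase k).items.Sublist d.items := List.filter_sublist
  exact List.Nodup.sublist (hsub.map Prod.fst) h

theorem rebuild_eq_erase_items (node : Int) (d : PySem.Dict Int Int) :
    slRebuild node d = ((d.erase node).items).map (fun p => (p.2, p.1)) := rfl


theorem loop_eq (g : PySem.Dict Int (List Int)) :
    ∀ (fuel : Nat) (deg : PySem.Dict Int Int) (heap : List (Int × Int)) (ord : List Int),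
      deg.keys.Nodup →
      heap.Perm (deg.items.map (fun p => (p.2, p.1))) →
      slLoopA g fuel deg heap ord = slLoopB g fuel deg ord := by
  intro fuel
  induction fuel with
  | zero => intro deg heap ord _ _; rfl
  | succ fuel ih =>
    intro deg heap ord hnd hperm
    cases heap with
    | nil =>
      have hitems : deg.items = [] :=
        List.map_eq_nil_iff.mp hperm.symm.eq_nil
      have hk : deg.keys = [] := by simp [PySem.Dict.keys, hitems]
      simp only [slLoopA, slLoopB]
      rw [hk]
    | cons x xs =>
      have hmmem : pvPopMin x xs ∈ x :: xs := by
        unfold pvPopMin; exact foldlMin_mem (fun y => y) x xs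
      have hmmin : ∀ y ∈ x :: xs, pvLt y (pvPopMin x xs) = false := by
        intro y hy
        have := foldlMin_min (fun y => y) x xs y hy
        simpa [pvPopMin] using this
      rcases List.mem_map.mp (hperm.mem_iff.mp hmmem) with ⟨p, hp, hmp⟩
      cases hk : deg.keys with
      | nil =>
        have hmem := PySem.Dict.mem_keys_of_mem_items deg hp
        rw [hk] at hmem
        cases hmem
      | cons k ks =>
        have hgdp : deg.getD p.1 0 = p.2 :=
          PySem.Dict.getD_of_mem_items deg (by simpa using hp) hnd 0
        have hnmem : slArgmin deg k ks ∈ k :: ks := by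
          unfold slArgmin; exact foldlMin_mem (fun x => (deg.getD x 0, x)) k ks
        have hnmin : ∀ y ∈ k :: ks,
            pvLt (deg.getD y 0, y) (deg.getD (slArgmin deg k ks) 0, slArgmin deg k ks) = false := by
          intro y hy
          have := foldlMin_min (fun x => (deg.getD x 0, x)) k ks y hy
          simpa [slArgmin] using this
        have hnkeys0 : slArgmin deg k ks ∈ deg.keys := by rw [hk]; exact hnmem
        have hnkeys : slArgmin deg k ks ∈ deg.items.map (fun x => x.1) := hnkeys0
        rcases List.mem_map.mp hnkeys with ⟨q, hq, hq1⟩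
        have hgdq : deg.getD (slArgmin deg k ks) 0 = q.2 := by
          rw [← hq1]; exact PySem.Dict.getD_of_mem_items deg (by simpa using hq) hnd 0
        have hpairmem : (deg.getD (slArgmin deg k ks) 0, slArgmin deg k ks) ∈ x :: xs := by
          apply hperm.mem_iff.mpr
          exact List.mem_map.mpr ⟨q, hq, by rw [hgdq, hq1]⟩
        have hmkey : (deg.getD (pvPopMin x xs).2 0, (pvPopMin x xs).2) = pvPopMin x xs := by
          rw [← hmp]; simp [hgdp]
        have hm2keys : (pvPopMin x xs).2 ∈ k :: ks := by
          rw [← hmp]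
          exact hk ▸ PySem.Dict.mem_keys_of_mem_items deg hp
        have hmeq : pvPopMin x xs = (deg.getD (slArgmin deg k ks) 0, slArgmin deg k ks) := by
          apply pvLt_antisymm
          · have := hnmin _ hm2keys; rw [hmkey] at this; exact this
          · exact hmmin _ hpairmem
        simp only [slLoopA, slLoopB]
        rw [hk, hmeq, innerFold]
        apply ih
        · exact nodup_keys_erase _ _ (by rw [keys_foldB]; exact hnd)
        · by_cases hany :
            (g.getD (slArgmin deg k ks) []).any (fun nb => deg.contains nb) = true
          · rw [if_pos hany, rebuild_eq_erase_items]
          · rw [if_neg (by simpa using hany),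
              foldB_noAlive _ _ (by simpa using hany)]
            have herase : (deg.erase (slArgmin deg k ks)).items = deg.items.erase q := by
              show deg.items.filter _ = _
              rw [← filter_ne_eq_erase deg.items q hq hnd]
              rw [hq1]
            rw [herase, List.map_erase swapInj,
              show ((q.2 : Int), q.1) = (deg.getD (slArgmin deg k ks) 0, slArgmin deg k ks) by
                rw [hgdq, hq1]]
            exact hperm.erase _

theorem nodup_keys_graph_fold : ∀ (es : List (Int × Int)) (d : PySem.Dict Int (List Int)),
    d.keys.Nodup →
    (es.foldl (fun g e => (g.modify e.1 [] (· ++ [e.2])).modify e.2 [] (· ++ [e.1])) d).keys.Nodup := by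
  intro es
  induction es with
  | nil => intro d h; exact h
  | cons e t ih =>
    intro d h
    rw [List.foldl_cons]
    exact ih _ (PySem.Dict.nodup_keys_insert _ _ _ (PySem.Dict.nodup_keys_insert _ _ _ h))

theorem slGraph_nodup (edges : List (Int × Int)) : (slGraph edges).keys.Nodup :=
  nodup_keys_graph_fold edges _ PySem.Dict.nodup_keys_empty

theorem slDegree0_items (g : PySem.Dict Int (List Int)) (hg : g.keys.Nodup) :
    (slDegree0 g).items = g.items.map (fun p => (p.1, (p.2.length : Int))) := by
  unfold slDegree0
  show (List.foldl (fun acc p => acc.insert p.1 p.2) PySem.Dict.empty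
    (g.items.map (fun p => (p.1, (p.2.length : Int))))).items = _
  have h := PySem.Dict.items_foldl_insert_fresh
    (g.items.map (fun p => (p.1, (p.2.length : Int)))) (fun a => a.1) (fun a => a.2)
    PySem.Dict.empty (fun a _ => PySem.Dict.contains_empty _)
    (by simpa [List.map_map, Function.comp] using hg)
  rw [h]
  show [] ++ _ = _
  rw [List.nil_append, List.map_map]
  rfl

theorem filter_le_mono (l : List Int) (c : Int) :
    (l.filter (fun x => decide (c + 1 ≤ x))).length ≤ (l.filter (fun x => decide (c ≤ x))).length := by
  induction l with
  | nil => simp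
  | cons a t ih =>
    by_cases h1 : c + 1 ≤ a
    · rw [List.filter_cons_of_pos (by simp only [decide_eq_true_eq]; omega),
        List.filter_cons_of_pos (by simp only [decide_eq_true_eq]; omega)]
      simpa using ih
    · rw [List.filter_cons_of_neg (by simp only [decide_eq_true_eq]; omega)]
      by_cases h2 : c ≤ a
      · rw [List.filter_cons_of_pos (by simp only [decide_eq_true_eq]; omega)]
        simp only [List.length_cons]
        omega
      · rw [List.filter_cons_of_neg (by simp only [decide_eq_true_eq]; omega)]
        exact ih

theorem filter_succ_lt (l : List Int) (c : Int) (hc : c ∈ l) (hnd : l.Nodup) :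
    (l.filter (fun x => decide (c + 1 ≤ x))).length < (l.filter (fun x => decide (c ≤ x))).length := by
  induction l with
  | nil => cases hc
  | cons a t ih =>
    simp only [List.nodup_cons] at hnd
    rcases List.mem_cons.mp hc with rfl | hct
    · rw [List.filter_cons_of_neg (by simp only [decide_eq_true_eq]; omega),
        List.filter_cons_of_pos (by simp only [decide_eq_true_eq]; omega)]
      exact Nat.lt_succ_of_le (filter_le_mono t c)
    · have hrec := ih hct hnd.2
      by_cases h1 : c + 1 ≤ a
      · rw [List.filter_cons_of_pos (by simp only [decide_eq_true_eq]; omega),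
          List.filter_cons_of_pos (by simp only [decide_eq_true_eq]; omega)]
        simpa using hrec
      · rw [List.filter_cons_of_neg (by simp only [decide_eq_true_eq]; omega)]
        by_cases h2 : c ≤ a
        · rw [List.filter_cons_of_pos (by simp only [decide_eq_true_eq]; omega)]
          exact Nat.lt_succ_of_lt hrec
        · rw [List.filter_cons_of_neg (by simp only [decide_eq_true_eq]; omega)]
          exact hrec

theorem findB_spec (s : PySem.Set Int) (hs : List.Nodup s) :
    ∀ (fuel : Nat) (c0 : Int), (s.filter (fun x => decide (c0 ≤ x))).length < fuel →
      c0 ≤ slFindB s fuel c0 ∧ slFindB s fuel c0 ∉ s ∧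
        (∀ x, c0 ≤ x → x < slFindB s fuel c0 → x ∈ s) := by
  intro fuel
  induction fuel with
  | zero => intro c0 h; exact absurd h (Nat.not_lt_zero _)
  | succ fuel ih =>
    intro c0 h
    by_cases hc : PySem.Set.contains s c0 = true
    · have hcm : c0 ∈ s := (PySem.Set.contains_iff s c0).mp hc
      have hlt := filter_succ_lt s c0 hcm hs
      have hrec := ih (c0 + 1) (by omega)
      simp only [slFindB, hc, if_true]
      refine ⟨by have := hrec.1; omega, hrec.2.1, ?_⟩
      intro x hx1 hx2
      by_cases hxe : x = c0
      · subst hxe; exact hcm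
      · refine hrec.2.2 x ?_ hx2
        rcases eq_or_lt_of_le hx1 with h | h
        · exact absurd h.symm hxe
        · omega
    · have hcf : PySem.Set.contains s c0 = false := by simpa using hc
      simp only [slFindB, hcf, Bool.false_eq_true, if_false]
      exact ⟨le_refl _, fun hm => hc ((PySem.Set.contains_iff s c0).mpr hm),
        fun x hx1 hx2 => absurd hx2 (by omega)⟩

theorem findA_of_spec (s : PySem.Set Int) (n : Int) :
    ∀ (c0 r : Int), c0 ≤ r → r ∉ s → (∀ x, c0 ≤ x → x < r → x ∈ s) →
      slFindA s n c0 = if r < n then some r else none := by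
  have main : ∀ (t : Nat) (c0 r : Int), (n - c0).toNat ≤ t → c0 ≤ r → r ∉ s →
      (∀ x, c0 ≤ x → x < r → x ∈ s) → slFindA s n c0 = if r < n then some r else none := by
    intro t
    induction t with
    | zero =>
      intro c0 r ht h1 h2 h3
      rw [slFindA, dif_neg (by omega), if_neg (by omega)]
    | succ t iht =>
      intro c0 r ht h1 h2 h3
      rw [slFindA]
      by_cases hcn : c0 < n
      · rw [dif_pos hcn]
        by_cases hcs : PySem.Set.contains s c0 = true
        · rw [if_pos hcs]
          exact iht (c0 + 1) r (by omega)
            (by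
              rcases lt_or_eq_of_le h1 with h | h
              · omega
              · exact absurd (h ▸ (PySem.Set.contains_iff s c0).mp hcs) h2)
            h2 (fun x hx1 hx2 => h3 x (by omega) hx2)
        · rw [if_neg hcs]
          have hcr : c0 = r := by
            by_contra hne
            exact hcs ((PySem.Set.contains_iff s c0).mpr (h3 c0 le_rfl (by omega)))
          rw [hcr, if_pos (hcr ▸ hcn)]
      · rw [dif_neg hcn, if_neg (by omega)]
  intro c0 r h1 h2 h3
  exact main (n - c0).toNat c0 r le_rfl h1 h2 h3

theorem findEq (s : PySem.Set Int) (hs : List.Nodup s) (n : Int) :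
    slFindA s n 0 =
      if slFindB s (s.length + 1) 0 < n then some (slFindB s (s.length + 1) 0) else none := by
  have h := findB_spec s hs (s.length + 1) 0 (Nat.lt_succ_of_le (List.length_filter_le _ _))
  exact findA_of_spec s n 0 _ h.1 h.2.1 h.2.2

theorem colorLoop_eq (g : PySem.Dict Int (List Int)) (n : Int) (order : List Int) :
    slColorLoopA g n order = slColorLoopB g n order := by
  unfold slColorLoopA slColorLoopB
  have hf : (fun (col : PySem.Dict Int Int) (node : Int) =>
      match slFindA (slUsed g col node) n 0 with
      | some c => col.insert node c
      | none => col) =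
      (fun (col : PySem.Dict Int Int) (node : Int) =>
        let used := slUsed g col node
        let c := slFindB used (used.length + 1) 0
        if c < n then col.insert node c else col) := by
    funext col node
    have hnd : List.Nodup (slUsed g col node) := by
      unfold slUsed; exact PySem.Set.nodup_ofList _
    rw [findEq _ hnd n]
    by_cases hlt : slFindB (slUsed g col node) ((slUsed g col node).length + 1) 0 < n
    · rw [if_pos hlt]
      simp only [if_pos hlt]
    · rw [if_neg hlt]
      simp only [if_neg hlt]
  rw [hf]

-- ===== VERDICT (by name: the statement is the Claim_ definition above) =====
theorem sl_coloring_spec : Claim_equal_sl_coloring := by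
  unfold Claim_equal_sl_coloring
  intro edges n _
  unfold Spec_sl_coloring sl_coloring sl_coloring_alt
  have hg := slGraph_nodup edges
  have hitems := slDegree0_items (slGraph edges) hg
  have hknd : (slDegree0 (slGraph edges)).keys.Nodup := by
    show ((slDegree0 (slGraph edges)).items.map (fun x => x.1)).Nodup
    rw [hitems, List.map_map]
    exact hg
  have hperm : ((slGraph edges).items.map (fun p => ((p.2.length : Int), p.1))).Perm
      ((slDegree0 (slGraph edges)).items.map (fun p => (p.2, p.1))) := by
    rw [hitems, List.map_map]
    exact List.Perm.refl _
  have hsize : ((slGraph edges).items.map (fun p => ((p.2.length : Int), p.1))).length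
      = (slDegree0 (slGraph edges)).size := by
    show _ = (slDegree0 (slGraph edges)).items.length
    rw [hitems, List.length_map, List.length_map]
  dsimp only
  rw [colorLoop_eq, loop_eq (slGraph edges) _ _ _ _ hknd hperm, hsize]
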